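-- pv_equiv track=rewrite | github.com/photonized/ITI1120 | Assignments/Assignment 5/a5_part1_300064613.py | remove_pun
-- ===== SOURCE A (Python) =====
-- import string
--
-- def remove_pun(lst):
--     """(list)->list
--     returns a list of all the words with the punctuation removed.
--     Preconditions: none"""
--     not_allowed = string.punctuation
--     removed=[]
--     for line in lst:
--         temp_not_allowed = []
--         for word in line:
--             a=""
--             for char in word:
--                 if char not in not_allowed:
--                     a+=char
--             temp_not_allowed+=[a]
--         removed.append(temp_not_allowed)
--     return removed
-- ===== SOURCE B (Python) =====
-- import string
--
-- _TABLE = str.maketrans('', '', string.punctuation)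
--
-- def remove_pun(lst):
--     """Same result as A: delete punctuation via a prebuilt translation table
--     and nested comprehensions instead of char-by-char accumulation."""
--     return [[word.translate(_TABLE) for word in line] for line in lst]
-- ===== Notes on version B (the rewrite author's own statement) =====
-- stated objective: idiomatic
-- what changed: Replaces the triple explicit loop with per-character membership test and string accumulation by a prebuilt str.maketrans deletion table applied via str.translate inside nested comprehensions.
import Mathlib
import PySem

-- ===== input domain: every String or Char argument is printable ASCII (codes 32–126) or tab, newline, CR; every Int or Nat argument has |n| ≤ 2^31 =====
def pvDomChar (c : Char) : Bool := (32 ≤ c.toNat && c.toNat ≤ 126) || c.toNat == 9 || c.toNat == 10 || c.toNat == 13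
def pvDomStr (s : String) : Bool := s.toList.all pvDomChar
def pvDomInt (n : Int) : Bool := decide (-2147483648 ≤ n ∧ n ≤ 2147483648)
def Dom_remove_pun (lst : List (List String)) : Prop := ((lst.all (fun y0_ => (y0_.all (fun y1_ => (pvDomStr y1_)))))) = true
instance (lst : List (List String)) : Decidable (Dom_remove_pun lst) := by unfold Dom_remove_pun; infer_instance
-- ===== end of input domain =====

-- B replaces A's per-character branch-and-accumulate loop with a prebuilt deletion
-- table and nested comprehensions (objective: idiomatic; same cost).

-- string.punctuation, shared constant of the module
def pvPunct : List Char := "!\"#$%&'()*+,-./:;<=>?@[\\]^_`{|}~".toList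

-- ===== PORT A =====
-- A builds strings with `a += char`; ported exactly as a List Char accumulator
-- with String.mk at the end (Lean String ops are opaque to the kernel).
def remove_pun (lst : List (List String)) : List (List String) :=
  lst.foldl (fun removed line =>
    removed ++ [line.foldl (fun temp_not_allowed word =>
      temp_not_allowed ++ [String.mk (word.toList.foldl
        (fun a ch => if !(pvPunct.contains ch) then a ++ [ch] else a) [])]) []]) []

-- ===== PORT B =====
-- Source B's translation table keyed by punctuation: delete exactly the chars of pvPunct
def pvTranslate (w : String) : String :=
  String.mk (w.toList.filter (fun c => !(pvPunct.contains c)))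

def remove_pun_alt (lst : List (List String)) : List (List String) :=
  lst.map (fun line => line.map pvTranslate)

-- ===== PRECONDITION & SPEC =====
def Spec_remove_pun (lst : List (List String)) (out : List (List String)) : Prop := out = remove_pun_alt lst
instance (lst : List (List String)) (out : List (List String)) : Decidable (Spec_remove_pun lst out) := by unfold Spec_remove_pun; infer_instance

-- ===== CLAIM (what is proved, stated in full; the proofs are below) =====
def Claim_equal_remove_pun : Prop := ∀ (lst : List (List String)), Dom_remove_pun lst → Spec_remove_pun lst (remove_pun lst)

-- ===== LEMMAS AND PROOFS =====
theorem pv_foldl_append_map {α β : Type} (f : α → β) (l : List α) (acc : List β) :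
    l.foldl (fun a x => a ++ [f x]) acc = acc ++ l.map f := by
  induction l generalizing acc with
  | nil => simp
  | cons x xs ih => simp [ih]

-- ===== VERDICT (by name: the statement is the Claim_ definition above) =====
theorem remove_pun_spec : Claim_equal_remove_pun := by
  intro lst _
  unfold Spec_remove_pun remove_pun remove_pun_alt
  simp only [pv_foldl_append_map, List.nil_append]
  refine List.map_congr_left (fun line _ => ?_)
  refine List.map_congr_left (fun word _ => ?_)
  rw [PySem.List.foldl_append_if_eq_filter]
  simp [pvTranslate]
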